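-- pv_equiv track=rewrite | github.com/PrinceSinghhub/GFG-Questions | Partitions with Given Difference.py | countPartitions
-- ===== SOURCE A (Python) =====
-- from typing import List
--
-- def countPartitions(n: int, d: int, arr: List[int]) -> int:
--     MOD = 10 ** 9 + 7
--     total_sum = sum(arr)
--
--     # Check if sum(arr) + d is even
--     if (total_sum + d) % 2 != 0:
--         return 0
--
--     # Calculate the target sum for one subset
--     target_sum = (total_sum + d) // 2
--
--     # Edge case: If target_sum is negative, it's not possible
--     if target_sum < 0:
--         return 0
--
--     # Initialize the dp array
--     dp = [0] * (target_sum + 1)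
--     dp[0] = 1  # There is one way to make the sum 0 (using no elements)
--
--     # Update dp array for each number in arr
--     for num in arr:
--         for j in range(target_sum, num - 1, -1):
--             dp[j] = (dp[j] + dp[j - num]) % MOD
--
--     return dp[target_sum]
-- ===== SOURCE B (Python) =====
-- from typing import List
--
-- def countPartitions(n: int, d: int, arr: List[int]) -> int:
--     MOD = 10 ** 9 + 7
--     total_sum = sum(arr)
--
--     if (total_sum + d) % 2 != 0:
--         return 0
--
--     target_sum = (total_sum + d) // 2
--     if target_sum < 0:
--         return 0
--
--     # Top-down memoized recursion: f(i, t) = number of subsets of arr[:i]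
--     # summing to t, modulo MOD (include/exclude on arr[i-1]).
--     memo = {}
--
--     def f(i, t):
--         if i == 0:
--             return 1 if t == 0 else 0
--         key = (i, t)
--         if key in memo:
--             return memo[key]
--         x = arr[i - 1]
--         res = (f(i - 1, t) + (f(i - 1, t - x) if x <= t else 0)) % MOD
--         memo[key] = res
--         return res
--
--     return f(len(arr), target_sum)
-- ===== Notes on version B (the rewrite author's own statement) =====
-- stated objective: alternative
-- what changed: Replaces the bottom-up in-place 1D DP table with a top-down memoized recursion f(i, t) = f(i-1, t) + (f(i-1, t - arr[i-1]) if arr[i-1] <= t else 0) mod 1e9+7, cached on (i, t), returning f(n, target_sum).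
import Mathlib
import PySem

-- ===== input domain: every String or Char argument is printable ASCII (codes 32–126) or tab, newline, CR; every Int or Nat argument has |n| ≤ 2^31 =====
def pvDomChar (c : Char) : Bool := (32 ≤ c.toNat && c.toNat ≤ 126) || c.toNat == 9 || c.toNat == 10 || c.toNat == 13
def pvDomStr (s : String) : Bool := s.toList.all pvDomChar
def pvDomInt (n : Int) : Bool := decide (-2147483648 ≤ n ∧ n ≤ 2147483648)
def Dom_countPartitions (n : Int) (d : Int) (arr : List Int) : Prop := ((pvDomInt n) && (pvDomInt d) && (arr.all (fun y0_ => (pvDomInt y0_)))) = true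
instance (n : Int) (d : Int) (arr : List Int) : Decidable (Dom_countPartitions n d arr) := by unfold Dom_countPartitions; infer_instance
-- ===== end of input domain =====

-- B replaces A's bottom-up in-place 1D DP table by a top-down memoized recursion
-- f(i, t) = f(i-1, t) + (f(i-1, t-arr[i-1]) if arr[i-1] ≤ t else 0) mod 1e9+7,
-- cached on (i, t) (objective: alternative; same asymptotic cost, not claimed faster).

-- ===== PORT A =====
-- dp[j] reads/writes use the total forms pyGetD/pySetD: under Pre_countPartitions every
-- index is in range, exactly where the Python returns (outside, A raises IndexError).
def countPartitions (n : Int) (d : Int) (arr : List Int) : Int :=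
  let MOD : Int := 10 ^ 9 + 7
  let total_sum := arr.sum
  if PySem.Int.mod (total_sum + d) 2 ≠ 0 then 0
  else
    let target_sum := PySem.Int.floordiv (total_sum + d) 2
    if target_sum < 0 then 0
    else
      let dp := (List.replicate (target_sum + 1).toNat 0).set 0 1
      let dp := arr.foldl (fun dp num =>
        (PySem.List.pyRange target_sum (num - 1) (-1)).foldl (fun dp j =>
          PySem.List.pySetD dp j
            (PySem.Int.mod (PySem.List.pyGetD dp j 0 + PySem.List.pyGetD dp (j - num) 0) MOD)) dp) dp
      PySem.List.pyGetD dp target_sum 0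

-- ===== PORT B =====
-- Source B's helper f(i, t), with the memo dict threaded through explicitly; the index
-- arr[i-1] is read with pyGetD (in every reachable call 1 ≤ i ≤ len(arr), so in range).
def pvFB (arr : List Int) (MOD : Int) : Nat → Int → PySem.Dict (Int × Int) Int → Int × PySem.Dict (Int × Int) Int
  | 0, t, memo => (if t = 0 then 1 else 0, memo)
  | i + 1, t, memo =>
    let key : Int × Int := (((i + 1 : Nat) : Int), t)
    match memo.get? key with
    | some v => (v, memo)
    | none =>
      let x := PySem.List.pyGetD arr ((i : Nat) : Int) 0
      let p1 := pvFB arr MOD i t memo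
      if x ≤ t then
        let p2 := pvFB arr MOD i (t - x) p1.2
        let res := PySem.Int.mod (p1.1 + p2.1) MOD
        (res, p2.2.insert key res)
      else
        let res := PySem.Int.mod (p1.1 + 0) MOD
        (res, p1.2.insert key res)

def countPartitions_alt (n : Int) (d : Int) (arr : List Int) : Int :=
  let MOD : Int := 10 ^ 9 + 7
  let total_sum := arr.sum
  if PySem.Int.mod (total_sum + d) 2 ≠ 0 then 0
  else
    let target_sum := PySem.Int.floordiv (total_sum + d) 2
    if target_sum < 0 then 0
    else
      (pvFB arr MOD arr.length target_sum PySem.Dict.empty).1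

-- ===== PRECONDITION & SPEC =====
-- Pre_ excludes exactly the inputs on which A raises IndexError (a negative element with
-- (sum(arr)+d) even and nonnegative reads dp[j-num] past the end of the table).
def Pre_countPartitions (n : Int) (d : Int) (arr : List Int) : Prop :=
  (∀ x ∈ arr, 0 ≤ x) ∨ PySem.Int.mod (arr.sum + d) 2 ≠ 0 ∨ arr.sum + d < 0
instance (n : Int) (d : Int) (arr : List Int) : Decidable (Pre_countPartitions n d arr) := by
  unfold Pre_countPartitions; infer_instance
def pvWitness_countPartitions : Int × Int × List Int := (3, 0, [1, 1, 2])

def Spec_countPartitions (n : Int) (d : Int) (arr : List Int) (out : Int) : Prop := out = countPartitions_alt n d arr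
instance (n : Int) (d : Int) (arr : List Int) (out : Int) : Decidable (Spec_countPartitions n d arr out) := by unfold Spec_countPartitions; infer_instance

-- ===== CLAIM (what is proved, stated in full; the proofs are below) =====
def Claim_equal_countPartitions : Prop := ∀ (n : Int) (d : Int) (arr : List Int), Dom_countPartitions n d arr → Pre_countPartitions n d arr → Spec_countPartitions n d arr (countPartitions n d arr)

-- ===== LEMMAS AND PROOFS =====

-- the exact (un-modded) number of subsets of l summing to t
def pvCnt : List Int → Int → Int
  | [], t => if t = 0 then 1 else 0
  | x :: xs, t => pvCnt xs t + pvCnt xs (t - x)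

def pvM : Int := 1000000007

lemma pvCnt_neg (l : List Int) (t : Int) (hl : ∀ x ∈ l, 0 ≤ x) (ht : t < 0) : pvCnt l t = 0 := by
  induction l generalizing t with
  | nil => simp [pvCnt]; omega
  | cons x xs ih =>
    have hx := hl x (by simp)
    have hl' : ∀ y ∈ xs, (0:Int) ≤ y := fun y hy => hl y (List.mem_cons_of_mem _ hy)
    simp only [pvCnt]
    rw [ih _ hl' ht, ih _ hl' (by omega)]; ring

lemma pvCnt_append (p : List Int) (x t : Int) :
    pvCnt (p ++ [x]) t = pvCnt p t + pvCnt p (t - x) := by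
  induction p generalizing t with
  | nil => simp [pvCnt]
  | cons y ys ih =>
    simp only [List.cons_append, pvCnt, ih]
    have : t - y - x = t - x - y := by ring
    rw [this]; ring

-- A-side: reading/writing the dp table at nonnegative Int indices
lemma pvGetSet (xs : List Int) (i j v : Int) (h0 : 0 ≤ i) (hi : i < xs.length)
    (hj : 0 ≤ j) :
    PySem.List.pyGetD (PySem.List.pySetD xs i v) j 0
      = if j = i then v else PySem.List.pyGetD xs j 0 := by
  have hi' : i = ((i.toNat : Nat) : Int) := by omega
  have hj' : j = ((j.toNat : Nat) : Int) := by omega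
  rw [hi', hj', PySem.List.pyGetD_pySetD_natCast xs i.toNat j.toNat v 0 (by omega)]
  split_ifs with h1 h2 h3 <;> first | rfl | omega

-- A's inner (descending) loop, characterised pointwise
lemma pvInnerA (num : Int) (hnum : 0 ≤ num) (T : Int) (M : Int) (k : Nat) :
    ∀ dp : List Int, dp.length = (T + 1).toNat → num - 1 + (k : Int) ≤ T →
    ((PySem.List.pyRange (num - 1 + (k : Int)) (num - 1) (-1)).foldl (fun dp j =>
        PySem.List.pySetD dp j
          (PySem.Int.mod (PySem.List.pyGetD dp j 0 + PySem.List.pyGetD dp (j - num) 0) M)) dp).length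
      = dp.length ∧
    ∀ j : Int, 0 ≤ j → j ≤ T →
      PySem.List.pyGetD ((PySem.List.pyRange (num - 1 + (k : Int)) (num - 1) (-1)).foldl (fun dp j =>
        PySem.List.pySetD dp j
          (PySem.Int.mod (PySem.List.pyGetD dp j 0 + PySem.List.pyGetD dp (j - num) 0) M)) dp) j 0
        = if num ≤ j ∧ j ≤ num - 1 + (k : Int)
          then PySem.Int.mod (PySem.List.pyGetD dp j 0 + PySem.List.pyGetD dp (j - num) 0) M
          else PySem.List.pyGetD dp j 0 := by
  induction k with
  | zero =>
    intro dp hlen _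
    rw [show ((0:Nat):Int) = 0 from rfl, add_zero,
        PySem.List.pyRange_neg_one_eq_nil (le_refl _)]
    refine ⟨rfl, fun j h0 hT' => ?_⟩
    rw [if_neg (by omega), List.foldl_nil]
  | succ k ih =>
    intro dp hlen hle
    have hlen' : (dp.length : Int) = T + 1 := by omega
    have hcons : PySem.List.pyRange (num - 1 + ((k+1 : Nat) : Int)) (num - 1) (-1)
        = (num - 1 + ((k+1 : Nat) : Int)) :: PySem.List.pyRange (num - 1 + ((k : Nat) : Int)) (num - 1) (-1) := by
      rw [PySem.List.pyRange_neg_one_cons (by push_cast; omega)]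
      congr 1
      push_cast; ring
    rw [hcons, List.foldl_cons]
    have ha0 : (0:Int) ≤ num - 1 + ((k+1 : Nat) : Int) := by push_cast; omega
    have hget : ∀ x : Int, 0 ≤ x →
        PySem.List.pyGetD (PySem.List.pySetD dp (num - 1 + ((k+1 : Nat) : Int))
          (PySem.Int.mod (PySem.List.pyGetD dp (num - 1 + ((k+1 : Nat) : Int)) 0
            + PySem.List.pyGetD dp (num - 1 + ((k+1 : Nat) : Int) - num) 0) M)) x 0
        = if x = num - 1 + ((k+1 : Nat) : Int)
          then PySem.Int.mod (PySem.List.pyGetD dp (num - 1 + ((k+1 : Nat) : Int)) 0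
            + PySem.List.pyGetD dp (num - 1 + ((k+1 : Nat) : Int) - num) 0) M
          else PySem.List.pyGetD dp x 0 := by
      intro x hx
      exact pvGetSet dp _ x _ ha0 (by push_cast at hle ⊢; omega) hx
    obtain ⟨ihlen, ihget⟩ := ih (PySem.List.pySetD dp (num - 1 + ((k+1 : Nat) : Int))
        (PySem.Int.mod (PySem.List.pyGetD dp (num - 1 + ((k+1 : Nat) : Int)) 0
          + PySem.List.pyGetD dp (num - 1 + ((k+1 : Nat) : Int) - num) 0) M))
      (by rw [PySem.List.length_pySetD]; exact hlen)
      (by push_cast at hle ⊢; omega)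
    constructor
    · rw [ihlen, PySem.List.length_pySetD]
    · intro j h0 hT'
      rw [ihget j h0 hT']
      by_cases hc : num ≤ j ∧ j ≤ num - 1 + ((k : Nat) : Int)
      · rw [if_pos hc, if_pos (by push_cast at hc ⊢; omega),
            hget j h0, if_neg (by push_cast at hc ⊢; omega),
            hget (j - num) (by omega), if_neg (by push_cast at hc ⊢; omega)]
      · rw [if_neg hc, hget j h0]
        by_cases hj : j = num - 1 + ((k+1 : Nat) : Int)
        · rw [if_pos hj, if_pos (by push_cast at hj ⊢; omega), hj]
        · rw [if_neg hj, if_neg (by push_cast at hc hj ⊢; omega)]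

-- A's outer loop: dp[j] = pvCnt (processed prefix) j % pvM
lemma pvOuterA (T : Int) (hT : 0 ≤ T) :
    ∀ (l : List Int) (hl : ∀ x ∈ l, 0 ≤ x) (p : List Int) (hp : ∀ x ∈ p, 0 ≤ x)
      (dp : List Int), dp.length = (T + 1).toNat →
      (∀ j : Int, 0 ≤ j → j ≤ T → PySem.List.pyGetD dp j 0 = pvCnt p j % pvM) →
      (l.foldl (fun dp num =>
        (PySem.List.pyRange T (num - 1) (-1)).foldl (fun dp j =>
          PySem.List.pySetD dp j
            (PySem.Int.mod (PySem.List.pyGetD dp j 0 + PySem.List.pyGetD dp (j - num) 0) pvM)) dp) dp).length = (T + 1).toNat ∧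
      ∀ j : Int, 0 ≤ j → j ≤ T →
        PySem.List.pyGetD (l.foldl (fun dp num =>
          (PySem.List.pyRange T (num - 1) (-1)).foldl (fun dp j =>
            PySem.List.pySetD dp j
              (PySem.Int.mod (PySem.List.pyGetD dp j 0 + PySem.List.pyGetD dp (j - num) 0) pvM)) dp) dp) j 0
          = pvCnt (p ++ l) j % pvM := by
  intro l
  induction l with
  | nil =>
    intro _ p _ dp hlen hval
    exact ⟨by rw [List.foldl_nil]; exact hlen, by simpa using hval⟩
  | cons num l' ih =>
    intro hl p hp dp hlen hval
    have hnum : (0:Int) ≤ num := hl num (by simp)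
    have hl' : ∀ x ∈ l', (0:Int) ≤ x := fun x hx => hl x (by simp [hx])
    have hp' : ∀ x ∈ p ++ [num], (0:Int) ≤ x := by
      intro x hx
      rcases List.mem_append.mp hx with h | h
      · exact hp x h
      · simp at h; omega
    have hMpos : (0:Int) < pvM := by norm_num [pvM]
    -- the dp table after processing num
    have hstep : ∀ dp', dp'.length = (T + 1).toNat →
        (∀ j : Int, 0 ≤ j → j ≤ T →
          PySem.List.pyGetD dp' j 0
            = if num ≤ j then PySem.Int.mod (PySem.List.pyGetD dp j 0 + PySem.List.pyGetD dp (j - num) 0) pvM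
              else PySem.List.pyGetD dp j 0) →
        (∀ j : Int, 0 ≤ j → j ≤ T → PySem.List.pyGetD dp' j 0 = pvCnt (p ++ [num]) j % pvM) := by
      intro dp' _ hchar j h0 hT'
      rw [hchar j h0 hT', pvCnt_append]
      by_cases hc : num ≤ j
      · rw [if_pos hc, PySem.Int.mod_eq_emod_of_pos hMpos,
            hval j h0 hT', hval (j - num) (by omega) (by omega), ← Int.add_emod]
      · rw [if_neg hc, pvCnt_neg p (j - num) hp (by omega), add_zero, hval j h0 hT']
    rw [List.foldl_cons]
    by_cases hT2 : num ≤ T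
    · obtain ⟨hilen, hichar⟩ := pvInnerA num hnum T pvM (T - num + 1).toNat dp hlen (by omega)
      have heqT : num - 1 + (((T - num + 1).toNat : Nat) : Int) = T := by omega
      rw [heqT] at hilen hichar
      have hchar' : ∀ j : Int, 0 ≤ j → j ≤ T →
          PySem.List.pyGetD ((PySem.List.pyRange T (num - 1) (-1)).foldl (fun dp j =>
            PySem.List.pySetD dp j
              (PySem.Int.mod (PySem.List.pyGetD dp j 0 + PySem.List.pyGetD dp (j - num) 0) pvM)) dp) j 0
            = if num ≤ j then PySem.Int.mod (PySem.List.pyGetD dp j 0 + PySem.List.pyGetD dp (j - num) 0) pvM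
              else PySem.List.pyGetD dp j 0 := by
        intro j h0 hT'
        rw [hichar j h0 hT']
        by_cases hc : num ≤ j
        · rw [if_pos (by omega), if_pos hc]
        · rw [if_neg (by omega), if_neg hc]
      have := ih hl' (p ++ [num]) hp' _ (by rw [hilen]; exact hlen)
        (hstep _ (by rw [hilen]; exact hlen) hchar')
      simpa using this
    · rw [PySem.List.pyRange_neg_one_eq_nil (by omega), List.foldl_nil]
      have hchar' : ∀ j : Int, 0 ≤ j → j ≤ T →
          PySem.List.pyGetD dp j 0
            = if num ≤ j then PySem.Int.mod (PySem.List.pyGetD dp j 0 + PySem.List.pyGetD dp (j - num) 0) pvM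
              else PySem.List.pyGetD dp j 0 := by
        intro j h0 hT'
        rw [if_neg (by omega)]
      have := ih hl' (p ++ [num]) hp' dp hlen (hstep dp hlen hchar')
      simpa using this

-- B-side: the memo invariant — every cached entry ((i, t), v) stores the modded count
-- of subsets of the length-i prefix summing to t
def pvInv (arr : List Int) (memo : PySem.Dict (Int × Int) Int) : Prop :=
  ∀ j t v, memo.get? (j, t) = some v → v = pvCnt (arr.take j.toNat) t % pvM

lemma pvInv_empty (arr : List Int) : pvInv arr PySem.Dict.empty := by
  intro j t v h
  rw [PySem.Dict.get?_empty] at h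
  exact absurd h (by simp)

-- B's memoized recursion computes the modded prefix count and preserves the invariant
lemma pvFB_correct (arr : List Int) (hnn : ∀ x ∈ arr, 0 ≤ x) :
    ∀ (i : Nat), i ≤ arr.length → ∀ (t : Int) (memo : PySem.Dict (Int × Int) Int),
      pvInv arr memo →
      (pvFB arr pvM i t memo).1 = pvCnt (arr.take i) t % pvM ∧
      pvInv arr (pvFB arr pvM i t memo).2 := by
  intro i
  induction i with
  | zero =>
    intro _ t memo hinv
    refine ⟨?_, hinv⟩
    simp only [pvFB, List.take_zero, pvCnt]
    split_ifs <;> norm_num [pvM]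
  | succ i ih =>
    intro hle t memo hinv
    have hle' : i ≤ arr.length := by omega
    have hi : i < arr.length := by omega
    have hx : PySem.List.pyGetD arr ((i : Nat) : Int) 0 = arr[i] := by
      rw [PySem.List.pyGetD_natCast, List.getD_eq_getElem?_getD, List.getElem?_eq_getElem hi,
          Option.getD_some]
    have hxnn : (0:Int) ≤ arr[i] := hnn _ (List.getElem_mem hi)
    have htake : arr.take (i + 1) = arr.take i ++ [arr[i]] := by
      rw [List.take_succ, List.getElem?_eq_getElem hi]
      rfl
    have hMpos : (0:Int) < pvM := by norm_num [pvM]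
    simp only [pvFB]
    cases hget : memo.get? (((i + 1 : Nat) : Int), t) with
    | some v =>
      refine ⟨?_, hinv⟩
      have := hinv _ _ _ hget
      simpa using this
    | none =>
      simp only [hx]
      obtain ⟨h1, hinv1⟩ := ih hle' t memo hinv
      by_cases hc : arr[i] ≤ t
      · rw [if_pos hc]
        obtain ⟨h2, hinv2⟩ := ih hle' (t - arr[i]) _ hinv1
        have hres : PySem.Int.mod ((pvFB arr pvM i t memo).1 + (pvFB arr pvM i (t - arr[i]) (pvFB arr pvM i t memo).2).1) pvM
            = pvCnt (arr.take (i + 1)) t % pvM := by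
          rw [h1, h2, PySem.Int.mod_eq_emod_of_pos hMpos, htake, pvCnt_append, ← Int.add_emod]
        refine ⟨hres, ?_⟩
        intro j u v h
        rw [PySem.Dict.get?_insert] at h
        by_cases hk : (j, u) = (((i + 1 : Nat) : Int), t)
        · rw [if_pos hk] at h
          injection hk with hj hu
          subst hj; subst hu
          simp only [Option.some.injEq] at h
          rw [← h, hres]
          simp
        · rw [if_neg hk] at h
          exact hinv2 _ _ _ h
      · rw [if_neg hc]
        have hres : PySem.Int.mod ((pvFB arr pvM i t memo).1 + 0) pvM
            = pvCnt (arr.take (i + 1)) t % pvM := by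
          rw [add_zero, h1, PySem.Int.mod_eq_emod_of_pos hMpos, htake, pvCnt_append,
              pvCnt_neg (arr.take i) (t - arr[i])
                (fun y hy => hnn y (List.mem_of_mem_take hy)) (by omega),
              add_zero, Int.emod_emod_of_dvd _ dvd_rfl]
        refine ⟨hres, ?_⟩
        intro j u v h
        rw [PySem.Dict.get?_insert] at h
        by_cases hk : (j, u) = (((i + 1 : Nat) : Int), t)
        · rw [if_pos hk] at h
          injection hk with hj hu
          subst hj; subst hu
          simp only [Option.some.injEq] at h
          rw [← h, hres]
          simp
        · rw [if_neg hk] at h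
          exact hinv1 _ _ _ h

-- the initial dp table of A
lemma pvDp0 (k m : Nat) (hm : m < k) :
    ((List.replicate k (0:Int)).set 0 1).getD m 0 = if m = 0 then 1 else 0 := by
  rw [List.getD_eq_getElem?_getD, List.getElem?_set]
  by_cases h : m = 0
  · rw [if_pos h.symm, if_pos (show 0 < (List.replicate k (0:Int)).length by rw [List.length_replicate]; omega), if_pos h]
    rfl
  · rw [if_neg (fun hc => h hc.symm), if_neg h, List.getElem?_replicate, if_pos hm]
    rfl

theorem countPartitions_spec : Claim_equal_countPartitions := by
  intro n d arr _ hpre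
  simp only [Spec_countPartitions, countPartitions, countPartitions_alt]
  by_cases h1 : PySem.Int.mod (arr.sum + d) 2 ≠ 0
  · rw [if_pos h1, if_pos h1]
  · rw [if_neg h1, if_neg h1]
    by_cases h2 : PySem.Int.floordiv (arr.sum + d) 2 < 0
    · rw [if_pos h2, if_pos h2]
    · rw [if_neg h2, if_neg h2]
      set target := PySem.Int.floordiv (arr.sum + d) 2 with htdef
      have htge : (0:Int) ≤ target := by omega
      have hnn : ∀ x ∈ arr, (0:Int) ≤ x := by
        rcases hpre with h | h | h
        · exact h
        · exact absurd h h1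
        · exfalso
          exact h2 (by rw [htdef, PySem.Int.floordiv_lt_iff_lt_mul (by norm_num)]; omega)
      rw [show ((10:Int) ^ 9 + 7) = pvM from by norm_num [pvM]]
      -- A's side
      have hlen0 : ((List.replicate (target + 1).toNat (0:Int)).set 0 1).length = (target + 1).toNat := by
        rw [List.length_set, List.length_replicate]
      have hval0 : ∀ j : Int, 0 ≤ j → j ≤ target →
          PySem.List.pyGetD ((List.replicate (target + 1).toNat (0:Int)).set 0 1) j 0
            = pvCnt [] j % pvM := by
        intro j h0 hT'
        rw [PySem.List.pyGetD_of_nonneg _ _ h0, pvDp0 (target + 1).toNat j.toNat (by omega)]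
        simp only [pvCnt]
        by_cases h : j = 0
        · rw [if_pos (by omega), if_pos h]; norm_num [pvM]
        · rw [if_neg (by omega), if_neg h]; norm_num [pvM]
      obtain ⟨-, hA⟩ := pvOuterA target htge arr hnn [] (by simp) _ hlen0 hval0
      rw [hA target htge (le_refl _)]
      -- B's side
      obtain ⟨hB, -⟩ := pvFB_correct arr hnn arr.length (le_refl _) target PySem.Dict.empty (pvInv_empty arr)
      rw [hB]
      simp
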